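-- pv_equiv track=rewrite | github.com/sh7shir/Anomaly-Labelling | 3_Result_Visualization/NAB_full/new_full_length.py | adjust_anomaly_signals_posedge
-- ===== SOURCE A (Python) =====
-- def adjust_anomaly_signals_posedge(detections, adjust: bool):
--     """
--     Only take into account no->yes changes (first timestamps) of the signal.
--     detections: list of bool
--     """
--     if adjust:
--         anomalies_adjusted = [False] * len(detections)
--         for y in range(len(detections)):
--             if y == 0:
--                 anomalies_adjusted[y] = detections[y]
--             else:
--                 anomalies_adjusted[y] = detections[y] and (not detections[y - 1])
--         return anomalies_adjusted
--     else:
--         return detections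
-- ===== SOURCE B (Python) =====
-- def adjust_anomaly_signals_posedge(detections, adjust: bool):
--     """
--     Only take into account no->yes changes (first timestamps) of the signal.
--     detections: list of bool
--     """
--     if adjust:
--         # run-length decomposition: scan maximal runs of equal values; a True run
--         # contributes a single True (its rising edge) followed by Falses, a False
--         # run contributes only Falses
--         out = []
--         i = 0
--         n = len(detections)
--         while i < n:
--             j = i + 1
--             while j < n and detections[j] == detections[i]:
--                 j += 1
--             if detections[i]:
--                 out.append(True)
--                 out.extend([False] * (j - i - 1))
--             else:
--                 out.extend([False] * (j - i))
--             i = j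
--         return out
--     else:
--         return detections
-- ===== Notes on version B (the rewrite author's own statement) =====
-- stated objective: alternative
-- what changed: Replaces the per-element indexed pass (current AND NOT previous with a y==0 special case) by a run-length decomposition: the list is split into maximal runs of equal values and each True run emits one True (its start) followed by Falses, each False run emits only Falses.
import Mathlib
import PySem

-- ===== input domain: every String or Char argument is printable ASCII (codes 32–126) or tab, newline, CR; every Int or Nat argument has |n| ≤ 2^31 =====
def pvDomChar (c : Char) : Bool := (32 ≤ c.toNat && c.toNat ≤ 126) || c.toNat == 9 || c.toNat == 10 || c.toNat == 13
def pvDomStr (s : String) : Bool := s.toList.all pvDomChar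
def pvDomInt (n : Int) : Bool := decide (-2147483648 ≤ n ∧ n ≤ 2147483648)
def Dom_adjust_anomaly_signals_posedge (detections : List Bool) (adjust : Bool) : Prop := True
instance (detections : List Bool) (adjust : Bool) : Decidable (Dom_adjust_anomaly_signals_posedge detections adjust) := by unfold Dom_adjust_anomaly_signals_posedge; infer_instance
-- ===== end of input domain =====

-- ===== PORT A =====
-- B replaces the per-element indexed pass by a run-length decomposition (maximal runs
-- of equal values; a True run emits one True then Falses); same return value, alternative.
def adjust_anomaly_signals_posedge (detections : List Bool) (adjust : Bool) : List Bool :=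
  if adjust then
    (PySem.List.pyRange 0 detections.length 1).foldl
      (fun acc y =>
        if y == 0 then
          PySem.List.pySetD acc y (PySem.List.pyGetD detections y false)
        else
          PySem.List.pySetD acc y
            (PySem.List.pyGetD detections y false && !(PySem.List.pyGetD detections (y - 1) false)))
      (List.replicate detections.length false)
  else
    detections

-- ===== PORT B =====
-- run scanner of Source B: the inner while loop collects the maximal leading run of the
-- head value (rest.takeWhile (· == v)); the outer loop continues on the remainder
def pvAltRuns : List Bool → List Bool
  | [] => []
  | v :: rest =>
    (if v then true :: List.replicate (rest.takeWhile (· == v)).length false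
     else List.replicate ((rest.takeWhile (· == v)).length + 1) false)
    ++ pvAltRuns (rest.dropWhile (· == v))
termination_by l => l.length
decreasing_by
  simp only [List.length_cons]
  exact Nat.lt_succ_of_le (List.length_dropWhile_le _ _)

def adjust_anomaly_signals_posedge_alt (detections : List Bool) (adjust : Bool) : List Bool :=
  if adjust then pvAltRuns detections else detections

-- ===== PRECONDITION & SPEC =====
def Spec_adjust_anomaly_signals_posedge (detections : List Bool) (adjust : Bool) (out : List Bool) : Prop := out = adjust_anomaly_signals_posedge_alt detections adjust
instance (detections : List Bool) (adjust : Bool) (out : List Bool) : Decidable (Spec_adjust_anomaly_signals_posedge detections adjust out) := by unfold Spec_adjust_anomaly_signals_posedge; infer_instance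

-- ===== CLAIM (what is proved, stated in full; the proofs are below) =====
def Claim_equal_adjust_anomaly_signals_posedge : Prop := ∀ (detections : List Bool) (adjust : Bool), Dom_adjust_anomaly_signals_posedge detections adjust → Spec_adjust_anomaly_signals_posedge detections adjust (adjust_anomaly_signals_posedge detections adjust)

-- ===== LEMMAS AND PROOFS =====

-- reference semantics: posedge with explicit previous value
def pvPose (prev : Bool) : List Bool → List Bool
  | [] => []
  | x :: xs => (x && !prev) :: pvPose x xs

theorem pvPose_run (v : Bool) (run after : List Bool) (h : ∀ x ∈ run, x = v) :
    pvPose v (run ++ after) = List.replicate run.length false ++ pvPose v after := by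
  induction run with
  | nil => simp
  | cons a rs ih =>
    have ha : a = v := h a (by simp)
    subst ha
    simp only [List.cons_append, pvPose, List.length_cons, List.replicate_succ]
    rw [ih (fun x hx => h x (by simp [hx]))]
    simp

theorem pvPose_head_indep (v : Bool) (l : List Bool) (h : ∀ a, l.head? = some a → a ≠ v) :
    pvPose v l = pvPose false l := by
  cases l with
  | nil => rfl
  | cons a rs =>
    have ha : a ≠ v := h a rfl
    cases v <;> cases a <;> simp_all [pvPose]

theorem pvAltRuns_eq_pose (l : List Bool) : pvAltRuns l = pvPose false l := by
  induction hn : l.length using Nat.strong_induction_on generalizing l with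
  | _ n ih =>
    cases l with
    | nil => simp [pvAltRuns, pvPose]
    | cons v rest =>
      have hsplit : rest = rest.takeWhile (· == v) ++ rest.dropWhile (· == v) :=
        (List.takeWhile_append_dropWhile).symm
      have hrun : ∀ x ∈ rest.takeWhile (· == v), x = v := by
        intro x hx
        have := List.mem_takeWhile_imp hx
        simpa using this
      have hdroplen : (rest.dropWhile (· == v)).length < n := by
        have := List.length_dropWhile_le (· == v) rest
        simp only [List.length_cons] at hn
        omega
      have hih := ih _ hdroplen (rest.dropWhile (· == v)) rfl
      have hhead : ∀ a, (rest.dropWhile (· == v)).head? = some a → a ≠ v := by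
        intro a hha hav
        subst hav
        have := List.head?_dropWhile_not (p := (· == a)) (l := rest)
        rw [hha] at this
        simp at this
      rw [pvAltRuns]
      conv_rhs => rw [show (v :: rest : List Bool) = v :: (rest.takeWhile (· == v) ++ rest.dropWhile (· == v)) from by rw [← hsplit]]
      simp only [pvPose, Bool.not_false, Bool.and_true]
      rw [pvPose_run v _ _ hrun, pvPose_head_indep v _ hhead, hih]
      cases v <;> simp [List.replicate_succ]

-- B's adjust-branch result in zipped form, used for the loop invariant of A's fold
def pvPosedge (d : List Bool) : List Bool :=
  (d.zip (false :: d)).map (fun p => p.1 && !p.2)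

theorem pvPose_eq_zip (prev : Bool) (d : List Bool) :
    pvPose prev d = (d.zip (prev :: d)).map (fun p => p.1 && !p.2) := by
  induction d generalizing prev with
  | nil => rfl
  | cons x xs ih => simp [pvPose, ih x]

theorem pvPosedge_length (d : List Bool) : (pvPosedge d).length = d.length := by
  simp [pvPosedge]

theorem pvPosedge_getElem (d : List Bool) (k : Nat) (hk : k < d.length) :
    (pvPosedge d)[k]'(by simp [pvPosedge_length, hk]) =
      (d[k] && !((false :: d)[k]'(by simp; omega))) := by
  simp [pvPosedge]

theorem pv_fold_inv (d : List Bool) (k : Nat) (hk : k ≤ d.length) :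
    (PySem.List.pyRange 0 k 1).foldl
      (fun acc y =>
        if y == 0 then
          PySem.List.pySetD acc y (PySem.List.pyGetD d y false)
        else
          PySem.List.pySetD acc y
            (PySem.List.pyGetD d y false && !(PySem.List.pyGetD d (y - 1) false)))
      (List.replicate d.length false)
    = (pvPosedge d).take k ++ List.replicate (d.length - k) false := by
  induction k with
  | zero => simp
  | succ j ih =>
    have hj : j < d.length := by omega
    have h1 : ((0 : Int) ≤ (j : Int)) := by positivity
    have hr : PySem.List.pyRange 0 ((j : Int) + 1) 1
        = PySem.List.pyRange 0 (j : Int) 1 ++ [(j : Int)] :=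
      PySem.List.pyRange_one_succ_right h1
    have hcast : ((j + 1 : Nat) : Int) = (j : Int) + 1 := by push_cast; ring
    rw [hcast, hr, List.foldl_append, ih (by omega)]
    simp only [List.foldl_cons, List.foldl_nil]
    have hlenp : (pvPosedge d).length = d.length := pvPosedge_length d
    have htake : ((pvPosedge d).take j).length = j := by
      simp [hlenp]; omega
    have hv : (if ((j : Int)) == 0 then PySem.List.pyGetD d (j : Int) false
        else PySem.List.pyGetD d (j : Int) false
          && !(PySem.List.pyGetD d ((j : Int) - 1) false))
        = (pvPosedge d)[j]'(by omega) := by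
      rw [pvPosedge_getElem d j hj]
      rcases Nat.eq_zero_or_pos j with h0 | hpos
      · subst h0
        simp [PySem.List.pyGetD_zero, List.getD_eq_getElem?_getD,
          List.getElem?_eq_getElem hj]
      · obtain ⟨i, rfl⟩ : ∃ i, j = i + 1 := ⟨j - 1, by omega⟩
        have hm1 : (((i + 1 : Nat) : Int)) - 1 = ((i : Nat) : Int) := by push_cast; ring
        rw [if_neg (by simp; omega), hm1]
        simp only [PySem.List.pyGetD_natCast]
        simp [List.getD_eq_getElem?_getD, List.getElem?_eq_getElem hj,
          List.getElem?_eq_getElem (show i < d.length by omega)]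
    rw [← apply_ite (fun v => PySem.List.pySetD
      ((pvPosedge d).take j ++ List.replicate (d.length - j) false) ((j : Nat) : Int) v), hv]
    rw [PySem.List.pySetD_natCast, List.set_append, htake, if_neg (lt_irrefl j), Nat.sub_self]
    have hsub : d.length - j = (d.length - (j + 1)) + 1 := by omega
    rw [hsub, List.replicate_succ, List.set_cons_zero]
    have htail : List.take (j + 1) (pvPosedge d)
        = List.take j (pvPosedge d) ++ [(pvPosedge d)[j]'(by omega)] := by
      rw [List.take_add_one, List.getElem?_eq_getElem (show j < (pvPosedge d).length by omega)]
      simp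
    rw [htail, List.append_assoc, List.singleton_append]

-- ===== VERDICT (by name: the statement is the Claim_ definition above) =====
theorem adjust_anomaly_signals_posedge_spec : Claim_equal_adjust_anomaly_signals_posedge := by
  intro d adj _
  unfold Spec_adjust_anomaly_signals_posedge adjust_anomaly_signals_posedge adjust_anomaly_signals_posedge_alt
  cases adj with
  | false => rfl
  | true =>
    simp only [if_true]
    have h := pv_fold_inv d d.length (le_refl _)
    rw [Nat.sub_self, List.replicate_zero, List.append_nil,
      List.take_of_length_le (le_of_eq (pvPosedge_length d))] at h
    rw [h, pvAltRuns_eq_pose, pvPose_eq_zip]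
    rfl
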